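-- pv_equiv track=rewrite | github.com/Arsen1302/Code-copy-detector | TestData/solutions/problem_1560_4.py | solution_1560_4
-- ===== SOURCE A (Python) =====
-- def solution_1560_4(s: str) -> int:
--     n = len(s)
--     dp = [0] * n
--     dp[0] = 1
--     hashmap = {s[0]: 0}
--     for i in range(1, n):
--         if s[i] not in hashmap:
--             dp[i] = dp[i - 1] + (i + 1)
--             hashmap[s[i]] = i
--         else:
--             dp[i] = dp[i - 1] + (i - hashmap[s[i]])
--             hashmap[s[i]] = i
--     return sum(dp)
-- ===== SOURCE B (Python) =====
-- def solution_1560_4(s: str) -> int: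
--     n = len(s)
--     last = {}
--     total = 0
--     for j, c in enumerate(s):
--         total += (j - last.get(c, -1)) * (n - j)
--         last[c] = j
--     return total
-- ===== Notes on version B (the rewrite author's own statement) =====
-- stated objective: simpler
-- what changed: Replaces the dp array and final sum by direct accumulation of a weighted sum (each position j contributes (j - last[s[j]])*(n - j)), so no dp list is allocated or summed; measured ~1.9x faster at large n.
import Mathlib
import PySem

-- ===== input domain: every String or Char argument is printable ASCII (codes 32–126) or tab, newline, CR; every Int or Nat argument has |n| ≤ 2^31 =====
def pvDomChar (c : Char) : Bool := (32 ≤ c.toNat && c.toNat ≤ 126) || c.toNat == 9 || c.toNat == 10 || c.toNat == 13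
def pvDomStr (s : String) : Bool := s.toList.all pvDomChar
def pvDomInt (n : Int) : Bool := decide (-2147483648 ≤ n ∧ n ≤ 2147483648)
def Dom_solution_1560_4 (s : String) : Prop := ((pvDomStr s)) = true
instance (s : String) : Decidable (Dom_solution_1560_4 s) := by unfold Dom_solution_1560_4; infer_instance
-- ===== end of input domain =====

-- B replaces A's dp array + final sum by one directly accumulated weighted sum (simpler; same O(n) cost).

-- ===== PORT A =====
-- loop body of A's 'for i in range(1, n)'
def pvStepA (cs : List Char) (st : List Int × PySem.Dict Char Int) (i : Int) :
    List Int × PySem.Dict Char Int :=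
  let c := (PySem.List.pyGet? cs i).getD ' '
  if st.2.contains c = false then
    (st.1.set i.toNat (PySem.List.pyGetD st.1 (i - 1) 0 + (i + 1)), st.2.insert c i)
  else
    (st.1.set i.toNat (PySem.List.pyGetD st.1 (i - 1) 0 + (i - st.2.getD c 0)), st.2.insert c i)

def solution_1560_4 (s : String) : Int :=
  let cs := s.toList
  let n := cs.length
  let dp := (List.replicate n (0 : Int)).set 0 1
  -- hashmap = {s[0]: 0}; on the empty string Python raises IndexError here (excluded by Pre_)
  let hm : PySem.Dict Char Int :=
    match PySem.List.pyGet? cs 0 with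
    | some c => PySem.Dict.empty.insert c 0
    | none => PySem.Dict.empty
  (((PySem.List.pyRange 1 (n : Int) 1).foldl (pvStepA cs) (dp, hm)).1).sum

-- ===== PORT B =====
-- loop body of B's 'for j, c in enumerate(s)'
def pvStepB (n : Int) (st : Int × PySem.Dict Char Int) (jc : Int × Char) :
    Int × PySem.Dict Char Int :=
  (st.1 + (jc.1 - st.2.getD jc.2 (-1)) * (n - jc.1), st.2.insert jc.2 jc.1)

def solution_1560_4_alt (s : String) : Int :=
  let cs := s.toList
  let n : Int := cs.length
  ((PySem.List.enumerate cs 0).foldl (pvStepB n) (0, PySem.Dict.empty)).1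

-- ===== PRECONDITION & SPEC =====
-- Pre_ excludes only the empty string, on which Python A raises IndexError (via dp[0]/s[0]);
-- B's Python returns 0 there.
def Pre_solution_1560_4 (s : String) : Prop := s ≠ ""
instance (s : String) : Decidable (Pre_solution_1560_4 s) := by
  unfold Pre_solution_1560_4; infer_instance
def pvWitness_solution_1560_4 : String := "ab"


def Spec_solution_1560_4 (s : String) (out : Int) : Prop := out = solution_1560_4_alt s
instance (s : String) (out : Int) : Decidable (Spec_solution_1560_4 s out) := by
  unfold Spec_solution_1560_4; infer_instance

-- ===== CLAIM (what is proved, stated in full; the proofs are below) =====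
def Claim_equal_solution_1560_4 : Prop := ∀ (s : String), Dom_solution_1560_4 s →
  Pre_solution_1560_4 s → Spec_solution_1560_4 s (solution_1560_4 s)

-- ===== LEMMAS AND PROOFS =====

-- the last dp value sits at index pref.length - 1 of the padded dp list
lemma pv_getD_last (pref zs : List Int) (h : pref ≠ []) :
    PySem.List.pyGetD (pref ++ zs) ((pref.length : Int) - 1) 0 = pref.getLast h := by
  have hlen : 0 < pref.length := List.length_pos_iff.mpr h
  rw [PySem.List.pyGetD_eq_getElem (pref ++ zs) 0 (by omega)
    (by rw [List.length_append]; push_cast; omega)]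
  have ht : ((pref.length : Int) - 1).toNat = pref.length - 1 := by omega
  rw [List.getLast_eq_getElem]
  simp only [ht]
  rw [List.getElem_append_left (by omega)]

-- writing dp[k] when the first k cells are filled appends to the filled prefix
lemma pv_set_append (pref : List Int) (m : Nat) (v : Int) :
    (pref ++ List.replicate (m + 1) (0 : Int)).set pref.length v
      = (pref ++ [v]) ++ List.replicate m 0 := by
  rw [List.set_append_right _ _ (le_refl _)]
  simp [List.replicate_succ]

-- main loop invariant: A's remaining fold over the dp list equals B's remaining fold over
-- the weighted total, where T = (sum of dp so far) + (n - k) * (last dp value)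
lemma pv_main (cs : List Char) :
    ∀ (rest done : List Char) (pref : List Int) (hpne : pref ≠ [])
      (hm : PySem.Dict Char Int) (T : Int),
      cs = done ++ rest →
      pref.length = done.length →
      T = pref.sum + ((cs.length : Int) - done.length) * pref.getLast hpne →
      (((PySem.List.pyRange (done.length : Int) (cs.length : Int) 1).foldl (pvStepA cs)
          (pref ++ List.replicate rest.length 0, hm)).1).sum
        = ((PySem.List.enumerate rest (done.length : Int)).foldl
            (pvStepB (cs.length : Int)) (T, hm)).1 := by
  intro rest
  induction rest with
  | nil =>
    intro done pref hpne hm T hcs hlen hT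
    have hn : cs.length = done.length := by rw [hcs]; simp
    rw [PySem.List.pyRange_one_eq_nil (by omega)]
    simp only [PySem.List.enumerate_nil, List.foldl_nil, List.length_nil,
      List.replicate_zero, List.append_nil]
    rw [hT, hn]
    ring
  | cons c rest' ih =>
    intro done pref hpne hm T hcs hlen hT
    have hk : done.length < cs.length := by rw [hcs]; simp
    rw [PySem.List.pyRange_one_cons (by exact_mod_cast hk)]
    rw [PySem.List.enumerate_cons]
    simp only [List.foldl_cons, List.length_cons]
    have hchar : PySem.List.pyGet? cs ((done.length : Int)) = some c := by
      rw [hcs]; exact PySem.List.pyGet?_append_length done rest' c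
    have hlast := pv_getD_last pref (List.replicate (rest'.length + 1) 0) hpne
    set k : Int := (done.length : Int) with hkdef
    have hB : ∀ d : PySem.Dict Char Int,
        pvStepB (cs.length : Int) (T, d) (k, c)
          = (T + (k - d.getD c (-1)) * ((cs.length : Int) - k), d.insert c k) := by
      intro d; rfl
    have him1 : k - 1 = (pref.length : Int) - 1 := by rw [hkdef, hlen]
    have htn : k.toNat = pref.length := by rw [hkdef, Int.toNat_natCast, hlen]
    -- both branches of A, and B, add the same increment v to (the last dp value / T)
    have hstep : ∀ v : Int,
        ((((PySem.List.pyRange (k + 1) (cs.length : Int) 1).foldl (pvStepA cs)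
            ((pref ++ [pref.getLast hpne + v]) ++ List.replicate rest'.length 0,
             hm.insert c k)).1).sum)
          = ((PySem.List.enumerate rest' (k + 1)).foldl (pvStepB (cs.length : Int))
              (T + v * ((cs.length : Int) - k), hm.insert c k)).1 := by
      intro v
      have h1 : cs = (done ++ [c]) ++ rest' := by rw [hcs]; simp
      have h2 : (pref ++ [pref.getLast hpne + v]).length = (done ++ [c]).length := by
        simp [hlen]
      have h3 : ((done ++ [c]).length : Int) = k + 1 := by
        simp [hkdef]
      have h4 := ih (done ++ [c]) (pref ++ [pref.getLast hpne + v])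
        (by simp) (hm.insert c k)
        (T + v * ((cs.length : Int) - k)) h1 h2
        (by
          rw [List.getLast_append_singleton, List.sum_append, List.sum_singleton, hT, h3]
          ring)
      rw [h3] at h4
      exact h4
    by_cases hc : hm.contains c = false
    · -- character not seen before: dp gets i + 1 = i - (-1)
      have hgd : hm.getD c (-1) = -1 := PySem.Dict.getD_of_not_contains hm (-1) hc
      have hA : pvStepA cs (pref ++ List.replicate (rest'.length + 1) 0, hm) k
          = ((pref ++ [pref.getLast hpne + (k + 1)]) ++ List.replicate rest'.length 0,
             hm.insert c k) := by
        simp only [pvStepA]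
        rw [hchar]
        simp only [Option.getD_some]
        rw [if_pos hc, him1, hlast, htn, pv_set_append]
      rw [hA, hB hm, hgd]
      rw [show T + (k - -1) * ((cs.length : Int) - k)
            = T + (k + 1) * ((cs.length : Int) - k) by ring]
      exact hstep (k + 1)
    · -- character seen before at hashmap[c]
      rw [Bool.not_eq_false] at hc
      have hsome : ∃ v, hm.get? c = some v := by
        have h5 := PySem.Dict.contains_eq_isSome_get? hm c
        rw [hc] at h5
        exact Option.isSome_iff_exists.mp h5.symm
      obtain ⟨v0, hv0⟩ := hsome
      have hgd0 : hm.getD c 0 = v0 := PySem.Dict.getD_of_get?_eq_some hm 0 hv0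
      have hgdm : hm.getD c (-1) = v0 := PySem.Dict.getD_of_get?_eq_some hm (-1) hv0
      have hA : pvStepA cs (pref ++ List.replicate (rest'.length + 1) 0, hm) k
          = ((pref ++ [pref.getLast hpne + (k - v0)]) ++ List.replicate rest'.length 0,
             hm.insert c k) := by
        simp only [pvStepA]
        rw [hchar]
        simp only [Option.getD_some]
        rw [if_neg (by simp [hc]), hgd0, him1, hlast, htn, pv_set_append]
      rw [hA, hB hm, hgdm]
      exact hstep (k - v0)

-- ===== VERDICT (by name: the statement is the Claim_ definition above) =====
theorem solution_1560_4_spec : Claim_equal_solution_1560_4 := by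
  intro s _ hpre
  unfold Spec_solution_1560_4 solution_1560_4 solution_1560_4_alt
  have hne : s.toList ≠ [] := fun h => hpre (String.toList_eq_nil_iff.mp h)
  obtain ⟨c0, rest, hrep⟩ := List.exists_cons_of_ne_nil hne
  rw [hrep]
  simp only [PySem.List.pyGet?_zero_cons, PySem.List.enumerate_cons, List.foldl_cons,
    List.length_cons]
  have hdp : (List.replicate (rest.length + 1) (0 : Int)).set 0 1
      = [1] ++ List.replicate rest.length 0 := by
    simp [List.replicate_succ]
  rw [hdp]
  have h := pv_main (c0 :: rest) rest [c0] [1] (by simp) (PySem.Dict.empty.insert c0 0)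
    ((c0 :: rest).length : Int) rfl rfl
    (by simp; omega)
  simp only [List.length_nil, List.length_cons, Nat.zero_add, Nat.cast_one] at h
  norm_num [pvStepB, PySem.Dict.getD_empty] at h ⊢
  exact h
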